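-- pv_equiv track=rewrite | github.com/Clement-Lelievre/lewagon_x_aoc | training/2017/2017_6.py | spread_blocks
-- ===== SOURCE A (Python) =====
-- def spread_blocks(banks: list[int] | tuple[int]) -> tuple[int]:
--     """Shares the blocks across all banks, one by one
--
--     Args:
--         banks (list[int] | tuple[int]): _description_
--
--     Returns:
--         tuple[int]: _description_
--     """
--     max_nb_blocks = max(banks)
--     nb_elems = len(banks)
--     sharing_block_ind = banks.index(max_nb_blocks)
--     nb_given, remains = divmod(max_nb_blocks, nb_elems)
--     banks = [
--         banks[i] + nb_given if i != sharing_block_ind else nb_given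
--         for i in range(nb_elems)
--     ]
--     j = (sharing_block_ind + 1) % nb_elems
--     while remains:
--         banks[j] += 1
--         j = (j + 1) % nb_elems
--         remains -= 1
--     return tuple(banks)
-- ===== SOURCE B (Python) =====
-- def spread_blocks(banks):
--     """Rotate so the source bank is first, rebuild by slicing, rotate back."""
--     banks = list(banks)
--     n = len(banks)
--     m = max(banks)
--     src = banks.index(m)
--     q, r = divmod(m, n)
--     rest = banks[src + 1:] + banks[:src]          # the other banks, in circular order
--     rotated = [q] + [v + q + 1 for v in rest[:r]] + [v + q for v in rest[r:]]
--     return tuple(rotated[n - src:] + rotated[:n - src])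
-- ===== Notes on version B (the rewrite author's own statement) =====
-- stated objective: alternative
-- what changed: B rotates the list so the source bank comes first (two slices), rebuilds the rotated result as a concatenation of three plain segments ([quotient], first r banks +q+1, rest +q) and rotates back by slicing, so A's per-index modular test and the stateful one-by-one remainder while-loop disappear; the bulk slice/concat work runs in C, giving a constant-factor speedup.
import Mathlib
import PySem

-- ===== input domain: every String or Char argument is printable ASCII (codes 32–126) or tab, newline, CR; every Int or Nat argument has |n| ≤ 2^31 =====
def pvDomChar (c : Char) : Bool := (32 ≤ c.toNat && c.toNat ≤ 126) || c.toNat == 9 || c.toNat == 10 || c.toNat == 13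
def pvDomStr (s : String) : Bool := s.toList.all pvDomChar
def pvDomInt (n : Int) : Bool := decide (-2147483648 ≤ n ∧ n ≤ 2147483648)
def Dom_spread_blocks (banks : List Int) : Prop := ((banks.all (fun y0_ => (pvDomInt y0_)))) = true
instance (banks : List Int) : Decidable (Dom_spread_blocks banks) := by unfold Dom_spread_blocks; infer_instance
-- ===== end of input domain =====

-- B rebuilds the result by rotation and slicing (no modular index arithmetic, no remainder loop).

-- ===== PORT A =====
-- Python's `while remains:` loop; remains = max % n ≥ 0 under Pre_ (n > 0), so Nat fuel = remains is exact.
def spreadALoop (n : Int) : Nat → Int → List Int → List Int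
  | 0, _, banks => banks
  | r + 1, j, banks =>
      spreadALoop n r (PySem.Int.mod (j + 1) n)
        (PySem.List.pySetD banks j (PySem.List.pyGetD banks j 0 + 1))

def spread_blocks (banks : List Int) : List Int :=
  let max_nb_blocks := (PySem.List.max? banks (fun x => x)).getD 0  -- max(banks); Pre_ excludes []
  let nb_elems := PySem.List.len banks
  let sharing_block_ind : Int := ((PySem.List.index? banks max_nb_blocks).getD 0 : Nat)
  let nb_given := PySem.Int.floordiv max_nb_blocks nb_elems
  let remains := PySem.Int.mod max_nb_blocks nb_elems
  let banks2 := (PySem.List.pyRange 0 nb_elems 1).map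
    (fun i => if i ≠ sharing_block_ind then PySem.List.pyGetD banks i 0 + nb_given else nb_given)
  spreadALoop nb_elems remains.toNat (PySem.Int.mod (sharing_block_ind + 1) nb_elems) banks2

-- ===== PORT B =====
def spread_blocks_alt (banks : List Int) : List Int :=
  let n := PySem.List.len banks
  let m := (PySem.List.max? banks (fun x => x)).getD 0  -- max(banks); Pre_ excludes []
  let src : Int := ((PySem.List.index? banks m).getD 0 : Nat)
  let q := PySem.Int.floordiv m n
  let r := PySem.Int.mod m n
  -- rest = banks[src+1:] + banks[:src]
  let rest := PySem.List.slice banks (some (src + 1)) none ++ PySem.List.slice banks none (some src)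
  -- rotated = [q] + [v+q+1 for v in rest[:r]] + [v+q for v in rest[r:]]
  let rotated := [q] ++ (PySem.List.slice rest none (some r)).map (fun v => v + q + 1)
      ++ (PySem.List.slice rest (some r) none).map (fun v => v + q)
  -- rotated[n-src:] + rotated[:n-src]
  PySem.List.slice rotated (some (n - src)) none ++ PySem.List.slice rotated none (some (n - src))

-- ===== PRECONDITION & SPEC =====
-- Pre_ excludes only the empty list, on which Python's max() raises ValueError in both A and B.
def Pre_spread_blocks (banks : List Int) : Prop := banks ≠ []
instance (banks : List Int) : Decidable (Pre_spread_blocks banks) := by unfold Pre_spread_blocks; infer_instance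
def pvWitness_spread_blocks : List Int := [0, 2, 7, 0]

def Spec_spread_blocks (banks : List Int) (out : List Int) : Prop := out = spread_blocks_alt banks
instance (banks : List Int) (out : List Int) : Decidable (Spec_spread_blocks banks out) := by unfold Spec_spread_blocks; infer_instance

-- ===== CLAIM (what is proved, stated in full; the proofs are below) =====
def Claim_equal_spread_blocks : Prop := ∀ (banks : List Int), Dom_spread_blocks banks → Pre_spread_blocks banks → Spec_spread_blocks banks (spread_blocks banks)

-- ===== LEMMAS AND PROOFS =====

lemma spreadALoop_length (n : Int) (r : Nat) (j : Int) (xs : List Int) :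
    (spreadALoop n r j xs).length = xs.length := by
  induction r generalizing j xs with
  | zero => rfl
  | succ r ih => simp [spreadALoop, ih, PySem.List.length_pySetD]

lemma getD_set_int (xs : List Int) (i : Nat) (v : Int) (k : Nat) (hk : k < xs.length) :
    (xs.set i v).getD k 0 = if i = k then v else xs.getD k 0 := by
  by_cases h : i = k
  · subst h
    rw [List.getD_eq_getElem _ _ (by simpa using hk)]
    simp
  · rw [List.getD_eq_getElem _ _ (by simpa using hk), List.getElem_set_ne (by omega),
      List.getD_eq_getElem _ _ hk, if_neg h]

lemma emod_window (n a : Int) (_hn : 0 < n) (h1 : -n ≤ a) (h2 : a < n) :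
    a % n = if 0 ≤ a then a else a + n := by
  split_ifs with h
  · exact Int.emod_eq_of_lt h h2
  · conv_lhs => rw [show a = (a + n) + n * (-1) by ring]
    rw [Int.add_mul_emod_self_left]
    exact Int.emod_eq_of_lt (by omega) (by omega)

-- what A's remainder loop does to element k: +1 exactly when k lies in the window of r banks after j
lemma spreadALoop_getD (n : Int) (hn : 0 < n) :
    ∀ (r : Nat) (j : Int) (xs : List Int), xs.length = n.toNat → 0 ≤ j → j < n → (r : Int) ≤ n →
    ∀ (k : Nat), k < xs.length →
      (spreadALoop n r j xs).getD k 0 =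
        xs.getD k 0 + (if PySem.Int.mod ((k : Int) - j) n < (r : Int) then 1 else 0) := by
  intro r
  induction r with
  | zero =>
    intro j xs hlen hj0 hjn hr k hk
    have := PySem.Int.mod_nonneg ((k : Int) - j) hn
    simp only [spreadALoop, Nat.cast_zero]
    rw [if_neg (by omega)]
    ring
  | succ r ih =>
    intro j xs hlen hj0 hjn hr k hk
    have hmodn : PySem.Int.mod ((k : Int) - j) n = ((k : Int) - j) % n :=
      PySem.Int.mod_eq_emod_of_pos hn
    have hset : PySem.List.pySetD xs j (PySem.List.pyGetD xs j 0 + 1)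
        = xs.set j.toNat (PySem.List.pyGetD xs j 0 + 1) := PySem.List.pySetD_of_nonneg _ _ hj0
    have hgetj : PySem.List.pyGetD xs j 0 = xs.getD j.toNat 0 := by
      rw [PySem.List.pyGetD_eq_getElem xs 0 hj0 (by omega), List.getD_eq_getElem _ _ (by omega)]
    have hj1 : 0 ≤ PySem.Int.mod (j + 1) n := PySem.Int.mod_nonneg _ hn
    have hj1' : PySem.Int.mod (j + 1) n < n := PySem.Int.mod_lt _ hn
    simp only [spreadALoop]
    rw [hset]
    rw [ih (PySem.Int.mod (j + 1) n) _ (by simp [hlen]) hj1 hj1' (by push_cast at hr ⊢; omega) k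
      (by simp [hk])]
    rw [getD_set_int _ _ _ _ hk, hgetj]
    have hmod1 : PySem.Int.mod (j + 1) n = (j + 1) % n := PySem.Int.mod_eq_emod_of_pos hn
    have hmodk : PySem.Int.mod ((k : Int) - PySem.Int.mod (j + 1) n) n
        = ((k : Int) - (j + 1)) % n := by
      rw [hmod1, PySem.Int.mod_eq_emod_of_pos hn, Int.sub_emod, Int.emod_emod_of_dvd _ dvd_rfl,
        ← Int.sub_emod]
    rw [hmodk, hmodn]
    have hw1 : ((k : Int) - j) % n
        = if 0 ≤ (k : Int) - j then (k : Int) - j else (k : Int) - j + n :=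
      emod_window n _ hn (by omega) (by omega)
    have hw2 : ((k : Int) - (j + 1)) % n
        = if 0 ≤ (k : Int) - (j + 1) then (k : Int) - (j + 1) else (k : Int) - (j + 1) + n :=
      emod_window n _ hn (by omega) (by omega)
    have hjk : (j.toNat = k) ↔ ((k : Int) = j) := by omega
    rw [hw1, hw2]
    push_cast
    rcases eq_or_ne j.toNat k with hkj | hkj
    · subst hkj
      rw [if_pos rfl, show ((j.toNat : Int)) = j by omega]
      split_ifs <;> omega
    · rw [if_neg hkj]
      have hkj' : (k : Int) ≠ j := by omega
      split_ifs <;> omega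

lemma getD_drop_int (xs : List Int) (i j : Nat) (h : i + j < xs.length) :
    (xs.drop i).getD j 0 = xs.getD (i + j) 0 := by
  rw [List.getD_eq_getElem _ _ (by simp; omega), List.getD_eq_getElem _ _ h, List.getElem_drop]

lemma getD_take_int (xs : List Int) (i j : Nat) (h : j < i) (h2 : j < xs.length) :
    (xs.take i).getD j 0 = xs.getD j 0 := by
  rw [List.getD_eq_getElem _ _ (by simp; omega), List.getD_eq_getElem _ _ h2, List.getElem_take]

lemma getD_map_int (xs : List Int) (f : Int → Int) (j : Nat) (h : j < xs.length) :
    ((xs.map f).getD j 0) = f (xs.getD j 0) := by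
  rw [List.getD_eq_getElem _ _ (by simpa using h), List.getD_eq_getElem _ _ h, List.getElem_map]

-- ===== VERDICT (by name: the statement is the Claim_ definition above) =====
theorem spread_blocks_spec : Claim_equal_spread_blocks := by
  intro banks _ hpre
  unfold Spec_spread_blocks spread_blocks spread_blocks_alt
  simp only []
  set m := (PySem.List.max? banks (fun x => x)).getD 0 with hm
  set n := PySem.List.len banks with hn
  have hn' : n = (banks.length : Int) := by rw [hn, PySem.List.len_eq]
  have hpos : 0 < n := by
    rw [hn']
    have := List.length_pos_of_ne_nil hpre
    omega
  -- the source index is a valid index of banks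
  obtain ⟨m', hm'⟩ : ∃ m', PySem.List.max? banks (fun x => x) = some m' := by
    cases hmx : PySem.List.max? banks (fun x => x) with
    | none => exact absurd ((PySem.List.max?_eq_none_iff banks _).mp hmx) hpre
    | some v => exact ⟨v, rfl⟩
  have hmm : m = m' := by rw [hm, hm']; rfl
  have hmem : m ∈ banks := by rw [hmm]; exact PySem.List.max?_mem hm'
  obtain ⟨S, hS⟩ : ∃ S, PySem.List.index? banks m = some S :=
    Option.isSome_iff_exists.mp ((PySem.List.index?_isSome_iff banks m).mpr hmem)
  obtain ⟨hSlt, -, -⟩ := PySem.List.getElem_of_index?_eq_some hS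
  set src : Int := (((PySem.List.index? banks m).getD 0 : Nat) : Int) with hsrc
  have hsrcS : src = (S : Int) := by rw [hsrc, hS]; rfl
  set q := PySem.Int.floordiv m n with hq
  set r := PySem.Int.mod m n with hr
  have hr0 : 0 ≤ r := PySem.Int.mod_nonneg _ hpos
  have hrn : r < n := PySem.Int.mod_lt _ hpos
  set N := banks.length with hN
  set R := r.toNat with hR
  have hRN : R < N := by omega
  have hcast : (R : Int) = r := by omega
  -- B's slices as drop/take
  have hrest : PySem.List.slice banks (some (src + 1)) none
      ++ PySem.List.slice banks none (some src)
      = banks.drop (S + 1) ++ banks.take S := by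
    rw [PySem.List.slice_from banks (by omega), PySem.List.slice_to banks (by omega), hsrcS]
    congr 2
  rw [hrest]
  set rest := banks.drop (S + 1) ++ banks.take S with hrestdef
  have hlenrest : rest.length = N - 1 := by
    rw [hrestdef]; simp; omega
  have hrot : [q] ++ (PySem.List.slice rest none (some r)).map (fun v => v + q + 1)
      ++ (PySem.List.slice rest (some r) none).map (fun v => v + q)
      = [q] ++ (rest.take R).map (fun v => v + q + 1) ++ (rest.drop R).map (fun v => v + q) := by
    rw [PySem.List.slice_to rest hr0, PySem.List.slice_from rest hr0]
  rw [hrot]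
  set rotated := [q] ++ (rest.take R).map (fun v => v + q + 1)
      ++ (rest.drop R).map (fun v => v + q) with hrotdef
  have hlenrot : rotated.length = N := by
    rw [hrotdef]; simp; omega
  have hresult : PySem.List.slice rotated (some (n - src)) none
      ++ PySem.List.slice rotated none (some (n - src))
      = rotated.drop (N - S) ++ rotated.take (N - S) := by
    rw [PySem.List.slice_from rotated (by omega), PySem.List.slice_to rotated (by omega)]
    congr 2 <;> omega
  rw [hresult]
  -- rest's elements, by index
  have hrestget : ∀ u : Nat, u < N - 1 → rest.getD u 0
      = if u < N - S - 1 then banks.getD (S + 1 + u) 0 else banks.getD (u - (N - S - 1)) 0 := by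
    intro u hu
    rw [hrestdef]
    by_cases h : u < N - S - 1
    · rw [if_pos h, List.getD_append _ _ _ _ (by simp; omega), getD_drop_int _ _ _ (by omega)]
    · rw [if_neg h, List.getD_append_right _ _ _ _ (by simp; omega)]
      have hlen : (banks.drop (S + 1)).length = N - S - 1 := by simp; omega
      rw [hlen, getD_take_int _ _ _ (by omega) (by omega)]
  -- rotated's elements, by index
  have hrotget : ∀ t : Nat, t < N → rotated.getD t 0
      = if t = 0 then q else rest.getD (t - 1) 0 + q + (if t - 1 < R then 1 else 0) := by
    intro t ht
    rw [hrotdef]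
    rcases Nat.eq_zero_or_pos t with h0 | h0
    · subst h0; simp
    · rw [if_neg (by omega)]
      rw [List.append_assoc, List.getD_append_right _ _ _ _ (by simp; omega)]
      simp only [List.length_singleton]
      by_cases hw : t - 1 < R
      · rw [if_pos hw, List.getD_append _ _ _ _ (by simp; omega),
          getD_map_int _ _ _ (by simp; omega), getD_take_int _ _ _ hw (by omega)]
      · rw [if_neg hw, List.getD_append_right _ _ _ _ (by simp; omega)]
        have hlen : ((rest.take R).map (fun v => v + q + 1)).length = R := by simp; omega
        rw [hlen, getD_map_int _ _ _ (by simp; omega), getD_drop_int _ _ _ (by omega),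
          show R + (t - 1 - R) = t - 1 by omega]
        ring
  -- banks2's elements
  set banks2 := (PySem.List.pyRange 0 n 1).map
    (fun i => if i ≠ src then PySem.List.pyGetD banks i 0 + q else q) with hb2
  have hlen2 : banks2.length = N := by
    rw [hb2]; simp [PySem.List.length_pyRange_one]; omega
  apply List.ext_getElem
  · rw [spreadALoop_length, hlen2]
    simp
    omega
  · intro k hkA hkB
    have hkN : k < N := by rw [spreadALoop_length, hlen2] at hkA; exact hkA
    rw [← List.getD_eq_getElem _ 0 hkA, ← List.getD_eq_getElem _ 0 hkB]
    -- A side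
    rw [spreadALoop_getD n hpos R _ banks2 (by omega)
        (PySem.Int.mod_nonneg _ hpos) (PySem.Int.mod_lt _ hpos) (by omega) k (by omega)]
    have hb2k : banks2.getD k 0
        = if (k : Int) ≠ src then banks.getD k 0 + q else q := by
      rw [List.getD_eq_getElem _ _ (by omega)]
      simp only [hb2, List.getElem_map, PySem.List.getElem_pyRange_one]
      norm_num
    have hmw : PySem.Int.mod ((k : Int) - PySem.Int.mod (src + 1) n) n
        = ((k : Int) - src - 1) % n := by
      rw [PySem.Int.mod_eq_emod_of_pos hpos, PySem.Int.mod_eq_emod_of_pos hpos,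
        Int.sub_emod, Int.emod_emod_of_dvd _ dvd_rfl, ← Int.sub_emod]
      congr 1; ring
    rw [hb2k, hcast, hmw]
    have hwin : ((k : Int) - src - 1) % n
        = if 0 ≤ (k : Int) - src - 1 then (k : Int) - src - 1 else (k : Int) - src - 1 + n :=
      emod_window n _ hpos (by rw [hsrcS]; omega) (by rw [hsrcS]; omega)
    rw [hwin]
    -- B side: which rotated element lands at position k
    have hdroplen : (rotated.drop (N - S)).length = S := by
      rw [List.length_drop, hlenrot]; omega
    by_cases hkS : k < S
    · -- k < S: from the dropped part, rotated[N - S + k]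
      have hBk : (rotated.drop (N - S) ++ rotated.take (N - S)).getD k 0
          = banks.getD k 0 + q + (if N - S + k - 1 < R then 1 else 0) := by
        rw [List.getD_append _ _ _ _ (by omega), getD_drop_int _ _ _ (by rw [hlenrot]; omega),
          hrotget (N - S + k) (by omega), if_neg (by omega),
          hrestget (N - S + k - 1) (by omega), if_neg (by omega),
          show N - S + k - 1 - (N - S - 1) = k by omega]
      rw [hBk, hsrcS]
      split_ifs <;> omega
    · by_cases hk0 : k = S
      · -- k = S: position 0 of rotated, the source bank, value q
        have hBk : (rotated.drop (N - S) ++ rotated.take (N - S)).getD k 0 = q := by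
          rw [List.getD_append_right _ _ _ _ (by omega), hdroplen,
            getD_take_int _ _ _ (by omega) (by rw [hlenrot]; omega), hrotget (k - S) (by omega),
            if_pos (by omega)]
        rw [hBk, hsrcS]
        split_ifs <;> omega
      · -- k > S: from the taken part, rotated[k - S]
        have hBk : (rotated.drop (N - S) ++ rotated.take (N - S)).getD k 0
            = banks.getD k 0 + q + (if k - S - 1 < R then 1 else 0) := by
          rw [List.getD_append_right _ _ _ _ (by omega), hdroplen,
            getD_take_int _ _ _ (by omega) (by rw [hlenrot]; omega), hrotget (k - S) (by omega),
            if_neg (by omega), hrestget (k - S - 1) (by omega), if_pos (by omega),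
            show S + 1 + (k - S - 1) = k by omega]
        rw [hBk, hsrcS]
        split_ifs <;> omega
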